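-- pv_equiv track=rewrite | github.com/pqzdev/sydney-streets | scripts/generate_sql_batches.py | parse_street_name
-- ===== SOURCE A (Python) =====
-- def parse_street_name(full_name):
--     """
--     Parse a full street name into base name and type.
--     E.g., "George Street" -> ("George", "Street")
--           "Main Road" -> ("Main", "Road")
--           "Broadway" -> ("Broadway", "")
--     """
--     # Common Australian street types
--     street_types = [
--         'Street', 'Road', 'Avenue', 'Drive', 'Lane', 'Way', 'Place', 'Circuit',
--         'Crescent', 'Court', 'Close', 'Terrace', 'Parade', 'Boulevard', 'Highway',
--         'Freeway', 'Motorway', 'Grove', 'Walk', 'Row', 'Square', 'Mews', 'Plaza',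
--         'Esplanade', 'Promenade', 'Parkway', 'Link', 'Loop', 'Rise', 'Chase',
--         'View', 'Ridge', 'Glade', 'Glen', 'Dell', 'Vale', 'Gardens', 'Park',
--         'Reserve', 'Green', 'Common', 'Mall', 'Arcade', 'Alley', 'Retreat',
--         'Approach', 'Path', 'Track', 'Trail', 'Bend', 'Corner', 'End', 'Cove'
--     ]
--
--     for street_type in street_types:
--         if full_name.endswith(' ' + street_type):
--             base_name = full_name[:-len(street_type)-1].strip()
--             return base_name, street_type
--
--     # No type found, return full name as base
--     return full_name, ''
-- ===== SOURCE B (Python) =====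
-- STREET_TYPES = frozenset([
--     'Street', 'Road', 'Avenue', 'Drive', 'Lane', 'Way', 'Place', 'Circuit',
--     'Crescent', 'Court', 'Close', 'Terrace', 'Parade', 'Boulevard', 'Highway',
--     'Freeway', 'Motorway', 'Grove', 'Walk', 'Row', 'Square', 'Mews', 'Plaza',
--     'Esplanade', 'Promenade', 'Parkway', 'Link', 'Loop', 'Rise', 'Chase',
--     'View', 'Ridge', 'Glade', 'Glen', 'Dell', 'Vale', 'Gardens', 'Park',
--     'Reserve', 'Green', 'Common', 'Mall', 'Arcade', 'Alley', 'Retreat',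
--     'Approach', 'Path', 'Track', 'Trail', 'Bend', 'Corner', 'End', 'Cove'
-- ])
--
--
-- def parse_street_name(full_name):
--     """Split at the last space and look the tail up in a set of street types."""
--     parts = full_name.rsplit(' ', 1)
--     if len(parts) == 2 and parts[1] in STREET_TYPES:
--         return parts[0].strip(), parts[1]
--     return full_name, ''
-- ===== Notes on version B (the rewrite author's own statement) =====
-- stated objective: simpler
-- what changed: Replaces the scan over all 53 street types with endswith tests by a single rsplit at the last space followed by one set-membership lookup of the tail.
import Mathlib
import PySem

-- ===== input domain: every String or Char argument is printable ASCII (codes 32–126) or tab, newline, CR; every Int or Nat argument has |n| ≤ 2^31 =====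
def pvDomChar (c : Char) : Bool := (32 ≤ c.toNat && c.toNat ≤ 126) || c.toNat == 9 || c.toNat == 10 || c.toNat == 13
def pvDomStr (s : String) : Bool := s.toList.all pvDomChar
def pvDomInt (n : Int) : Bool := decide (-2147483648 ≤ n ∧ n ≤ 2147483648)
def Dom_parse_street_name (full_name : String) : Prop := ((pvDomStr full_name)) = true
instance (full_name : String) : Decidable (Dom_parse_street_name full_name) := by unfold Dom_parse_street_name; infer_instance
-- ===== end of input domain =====

-- B replaces A's scan over all 53 street types (one endswith test each) by a single split
-- at the last space followed by one set-membership lookup of the tail (objective: simpler).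

-- ===== PORT A =====
def streetTypesA : List String := [
  "Street", "Road", "Avenue", "Drive", "Lane", "Way", "Place", "Circuit",
  "Crescent", "Court", "Close", "Terrace", "Parade", "Boulevard", "Highway",
  "Freeway", "Motorway", "Grove", "Walk", "Row", "Square", "Mews", "Plaza",
  "Esplanade", "Promenade", "Parkway", "Link", "Loop", "Rise", "Chase",
  "View", "Ridge", "Glade", "Glen", "Dell", "Vale", "Gardens", "Park",
  "Reserve", "Green", "Common", "Mall", "Arcade", "Alley", "Retreat",
  "Approach", "Path", "Track", "Trail", "Bend", "Corner", "End", "Cove"]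

-- the 'for street_type in street_types' loop of A
def psnLoop (full_name : String) : List String → String × String
  | [] => (full_name, "")
  | t :: rest =>
    if PySem.Str.endswith full_name (" " ++ t) then
      (PySem.Str.strip (PySem.Str.slice full_name none (some (-(PySem.Str.len t) - 1))), t)
    else psnLoop full_name rest

def parse_street_name (full_name : String) : String × String :=
  psnLoop full_name streetTypesA

-- ===== PORT B =====
-- frozenset of the same 53 types (a Python set of distinct strings)
def streetTypeSet : List String := PySem.Set.ofList streetTypesA

-- hand port of full_name.rsplit(' ', 1) (no PySem primitive): split at the LAST space;
-- exact: Python returns [s] when ' ' is absent, else [before, after] around the last ' '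
def rsplitSpace1 (s : List Char) : List (List Char) :=
  match s.reverse.dropWhile (fun c => c ≠ ' ') with
  | [] => [s]
  | _ :: preR => [preR.reverse, (s.reverse.takeWhile (fun c => c ≠ ' ')).reverse]

def parse_street_name_alt (full_name : String) : String × String :=
  let parts := rsplitSpace1 full_name.toList
  if parts.length = 2 ∧ streetTypeSet.contains (String.ofList (parts.getD 1 [])) then
    (String.ofList (PySem.Chars.strip (parts.getD 0 [])), String.ofList (parts.getD 1 []))
  else (full_name, "")

-- ===== PRECONDITION & SPEC =====
def Spec_parse_street_name (full_name : String) (out : String × String) : Prop := out = parse_street_name_alt full_name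
instance (full_name : String) (out : String × String) : Decidable (Spec_parse_street_name full_name out) := by unfold Spec_parse_street_name; infer_instance

-- ===== CLAIM (what is proved, stated in full; the proofs are below) =====
def Claim_equal_parse_street_name : Prop := ∀ (full_name : String), Dom_parse_street_name full_name → Spec_parse_street_name full_name (parse_street_name full_name)

-- ===== LEMMAS AND PROOFS =====

-- no street type contains a space
lemma streetTypes_spaceless : ∀ t ∈ streetTypesA, ' ' ∉ t.toList := by decide

-- two space-free blocks each followed by ' ' that are prefixes of the same list coincide
lemma spaceless_prefix_unique (l x1 x2 : List Char)
    (h1 : x1 ++ [' '] <+: l) (h2 : x2 ++ [' '] <+: l)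
    (n1 : ' ' ∉ x1) (n2 : ' ' ∉ x2) : x1 = x2 := by
  have key : ∀ a b : List Char, a ++ [' '] <+: b ++ [' '] → ' ' ∉ b → a = b := by
    intro a b hab nb
    rcases lt_or_ge a.length b.length with hl | hl
    · exfalso
      have hpre : a ++ [' '] <+: b :=
        List.prefix_of_prefix_length_le hab (List.prefix_append b [' ']) (by simp; omega)
      exact nb (hpre.subset (by simp))
    · have hlen : (a ++ [' ']).length = (b ++ [' ']).length := by
        have := hab.length_le; simp at this ⊢; omega
      simpa using List.IsPrefix.eq_of_length hab hlen
  rcases List.prefix_or_prefix_of_prefix h1 h2 with h | h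
  · exact key _ _ h n2
  · exact (key _ _ h n1).symm

-- with the name split as pre ++ ' ' ++ suf at the LAST space, a space-free type matches
-- A's endswith test exactly when it equals the tail suf
lemma endswith_iff_tail (fn : String) (preR suf : List Char)
    (hfn : fn.toList = preR.reverse ++ ' ' :: suf) (hsuf : ' ' ∉ suf)
    (t : String) (ht : ' ' ∉ t.toList) :
    PySem.Chars.endswith fn.toList (' ' :: t.toList) = true ↔ t.toList = suf := by
  rw [PySem.Chars.endswith_iff]
  constructor
  · intro h
    have h1 : (' ' :: t.toList).reverse <+: fn.toList.reverse := List.reverse_prefix.mpr h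
    have h2 : (' ' :: suf).reverse <+: fn.toList.reverse :=
      List.reverse_prefix.mpr ⟨preR.reverse, hfn.symm⟩
    have heq := spaceless_prefix_unique fn.toList.reverse t.toList.reverse suf.reverse
      (by simpa using h1) (by simpa using h2) (by simpa using ht) (by simpa using hsuf)
    have := congrArg List.reverse heq
    simpa using this
  · intro h
    subst h
    exact ⟨preR.reverse, hfn.symm⟩

-- A's slice full_name[:-len(t)-1] is exactly the part before the last space
lemma slice_eval (fn : String) (preR suf : List Char)
    (hfn : fn.toList = preR.reverse ++ ' ' :: suf) :
    (PySem.Str.slice fn none (some (-(suf.length : Int) - 1))).toList = preR.reverse := by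
  have h1 : (-(suf.length : Int) - 1) = -((suf.length + 1 : Nat) : Int) := by push_cast; ring
  rw [PySem.Str.toList_slice, PySem.Chars.slice_eq_listSlice, h1,
    PySem.List.slice_to_neg_natCast _ _ (by omega), hfn]
  have h2 : (preR.reverse ++ ' ' :: suf).length - (suf.length + 1) = preR.reverse.length := by
    simp
  rw [h2, List.take_left]

-- A's loop when the name contains no space: no type can match
lemma psnLoop_no_space (fn : String) (h : ' ' ∉ fn.toList) :
    ∀ ts : List String, psnLoop fn ts = (fn, "") := by
  intro ts
  induction ts with
  | nil => rfl
  | cons t rest ih =>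
    have hend : PySem.Chars.endswith fn.toList (' ' :: t.toList) = false := by
      rw [Bool.eq_false_iff]
      intro hc
      rw [PySem.Chars.endswith_iff] at hc
      exact h (hc.subset (by simp))
    simp [psnLoop, hend, ih]

-- A's loop when the name splits as pre ++ ' ' ++ suf at the last space
lemma psnLoop_space (fn : String) (preR suf : List Char)
    (hfn : fn.toList = preR.reverse ++ ' ' :: suf) (hsuf : ' ' ∉ suf) :
    ∀ ts : List String, (∀ t ∈ ts, ' ' ∉ t.toList) →
    psnLoop fn ts = if String.ofList suf ∈ ts
      then (String.ofList (PySem.Chars.strip preR.reverse), String.ofList suf)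
      else (fn, "") := by
  intro ts
  induction ts with
  | nil => intro _; simp [psnLoop]
  | cons t rest ih =>
    intro hts
    have ht : ' ' ∉ t.toList := hts t (by simp)
    have hrest : ∀ x ∈ rest, ' ' ∉ x.toList := fun x hx => hts x (List.mem_cons_of_mem _ hx)
    have hcons : (" " ++ t).toList = ' ' :: t.toList := by simp
    by_cases hm : t.toList = suf
    · have hend : PySem.Str.endswith fn (" " ++ t) = true := by
        rw [PySem.Str.endswith_eq, hcons, endswith_iff_tail fn preR suf hfn hsuf t ht]
        exact hm
      have hteq : t = String.ofList suf := by rw [← hm]; exact String.ofList_toList.symm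
      have hlen : PySem.Str.len t = (suf.length : Int) := by simp [← hm]
      have hfst : PySem.Str.strip (PySem.Str.slice fn none (some (-(PySem.Str.len t) - 1)))
          = String.ofList (PySem.Chars.strip preR.reverse) := by
        rw [hlen]
        have : (PySem.Str.strip (PySem.Str.slice fn none (some (-(suf.length : Int) - 1)))).toList
            = PySem.Chars.strip preR.reverse := by
          rw [PySem.Str.toList_strip, slice_eval fn preR suf hfn]
        rw [← this, String.ofList_toList]
      simp only [psnLoop, hend, if_true]
      rw [if_pos (by simp [hteq]), hfst, hteq]
    · have hend : PySem.Str.endswith fn (" " ++ t) = false := by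
        rw [PySem.Str.endswith_eq, hcons, Bool.eq_false_iff]
        intro hc
        exact hm ((endswith_iff_tail fn preR suf hfn hsuf t ht).mp hc)
      have hne : String.ofList suf ≠ t := by
        intro he
        apply hm
        rw [← he]
        exact String.toList_ofList
      simp only [psnLoop, hend, Bool.false_eq_true, if_false]
      rw [ih hrest]
      have hiff : (String.ofList suf ∈ t :: rest) ↔ (String.ofList suf ∈ rest) := by
        simp [List.mem_cons, hne]
      rw [if_congr hiff rfl rfl]
  
-- membership in the ported frozenset is membership in the type list
lemma streetTypeSet_contains (x : String) :
    streetTypeSet.contains x = true ↔ x ∈ streetTypesA := by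
  rw [List.contains_iff_mem, streetTypeSet, PySem.Set.mem_ofList]

-- ===== VERDICT (by name: the statement is the Claim_ definition above) =====
theorem parse_street_name_spec : Claim_equal_parse_street_name := by
  intro fn _
  unfold Spec_parse_street_name parse_street_name parse_street_name_alt
  cases hdw : fn.toList.reverse.dropWhile (fun c => c ≠ ' ') with
  | nil =>
    have hns : ' ' ∉ fn.toList := by
      rw [List.dropWhile_eq_nil_iff] at hdw
      intro hmem
      have := hdw ' ' (by simpa using hmem)
      simp at this
    rw [psnLoop_no_space fn hns]
    simp only [rsplitSpace1]
    rw [hdw]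
    simp
  | cons c preR =>
    have hc : c = ' ' := by
      have h2 := List.head_dropWhile_not (p := fun c : Char => decide (c ≠ ' ')) (l := fn.toList.reverse)
      rw [hdw] at h2
      simpa using h2
    subst hc
    have hfn : fn.toList = preR.reverse ++ ' ' :: (fn.toList.reverse.takeWhile (fun c => c ≠ ' ')).reverse := by
      have htd := List.takeWhile_append_dropWhile (p := fun c : Char => decide (c ≠ ' ')) (l := fn.toList.reverse)
      rw [hdw] at htd
      have h3 := congrArg List.reverse htd
      simpa using h3.symm
    have hsuf : ' ' ∉ (fn.toList.reverse.takeWhile (fun c => c ≠ ' ')).reverse := by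
      intro h
      rw [List.mem_reverse] at h
      have := List.mem_takeWhile_imp h
      simp at this
    rw [psnLoop_space fn preR _ hfn hsuf streetTypesA streetTypes_spaceless]
    simp only [rsplitSpace1]
    rw [hdw]
    set suf := (fn.toList.reverse.takeWhile (fun c => c ≠ ' ')).reverse with hs
    show (if String.ofList suf ∈ streetTypesA
      then (String.ofList (PySem.Chars.strip preR.reverse), String.ofList suf)
      else (fn, "")) =
      (if ([preR.reverse, suf].length = 2 ∧ streetTypeSet.contains (String.ofList ([preR.reverse, suf].getD 1 [])))
       then (String.ofList (PySem.Chars.strip ([preR.reverse, suf].getD 0 [])), String.ofList ([preR.reverse, suf].getD 1 []))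
       else (fn, ""))
    by_cases hmem : String.ofList suf ∈ streetTypesA
    · rw [if_pos hmem, if_pos]
      · simp
      · exact ⟨by simp, by simpa using (streetTypeSet_contains _).mpr (by simpa using hmem)⟩
    · rw [if_neg hmem, if_neg]
      intro ⟨_, hcont⟩
      exact hmem (by simpa using (streetTypeSet_contains _).mp (by simpa using hcont))
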